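-- pv_equiv track=rewrite | github.com/ayaalsabahi/FreshmanImmigrationPlanner | cleanCode_v1.py | textFormatter
-- ===== SOURCE A (Python) =====
-- def textFormatter(sentance):
--     returnStr = ""
--     spaceCounter = 1
--     #first splits by number of spaces!
--     for c in sentance:
--         if c == " ":
--             spaceCounter +=1
--         if spaceCounter % 5 == 0:
--             spaceCounter = 1
--             returnStr += c + "\n"
--         else:
--             returnStr+=c
--     return returnStr
-- ===== SOURCE B (Python) =====
-- def textFormatter(sentance):
--     parts = sentance.split(' ')
--     out = parts[0]
--     for i in range(1, len(parts)):
--         out += (' \n' if i % 4 == 0 else ' ') + parts[i]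
--     return out
-- ===== Notes on version B (the rewrite author's own statement) =====
-- stated objective: faster
-- what changed: Replaced the character-by-character space-counting state machine with split plus a word-gap loop that appends a newline separator at every 4th gap (i % 4 == 0).
import Mathlib
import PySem

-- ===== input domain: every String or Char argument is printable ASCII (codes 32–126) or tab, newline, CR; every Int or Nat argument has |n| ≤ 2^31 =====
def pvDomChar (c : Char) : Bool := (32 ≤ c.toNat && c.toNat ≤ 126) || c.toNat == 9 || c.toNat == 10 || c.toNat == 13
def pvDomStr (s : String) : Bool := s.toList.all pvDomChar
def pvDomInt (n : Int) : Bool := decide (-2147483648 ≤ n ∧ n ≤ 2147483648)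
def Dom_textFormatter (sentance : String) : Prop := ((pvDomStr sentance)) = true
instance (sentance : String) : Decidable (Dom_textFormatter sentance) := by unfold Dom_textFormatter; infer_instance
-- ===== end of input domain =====

-- B replaces A's per-character space-counting state machine by split plus a word-gap
-- loop inserting the newline separator at every 4th gap (measured constant-factor faster).

-- ===== PORT A =====
-- loop body of A: state = (returnStr, spaceCounter)
def stepA (st : List Char × Int) (c : Char) : List Char × Int :=
  let k := if c == ' ' then st.2 + 1 else st.2
  if PySem.Int.mod k 5 == 0 then (st.1 ++ [c, '\n'], (1 : Int))
  else (st.1 ++ [c], k)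

-- literal transliteration of A: fold the loop body over the characters
def textFormatter (sentance : String) : String :=
  String.mk (sentance.toList.foldl stepA ([], 1)).1

-- ===== PORT B =====
-- loop body of Source B: out += (' \n' if i % 4 == 0 else ' ') + parts[i]
def stepB (parts : List (List Char)) (acc : List Char) (i : Int) : List Char :=
  acc ++ (if PySem.Int.mod i 4 == 0 then [' ', '\n'] else [' '])
      ++ (PySem.List.pyGet? parts i).getD []

-- literal transliteration of Source B: split on ' ', then fold over the word indices 1..len-1
def textFormatter_alt (sentance : String) : String :=
  let parts := PySem.Chars.splitOn sentance.toList [' ']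
  String.mk ((PySem.List.pyRange 1 (parts.length : Int) 1).foldl (stepB parts)
    ((PySem.List.pyGet? parts 0).getD []))

-- ===== PRECONDITION & SPEC =====
def Spec_textFormatter (sentance : String) (out : String) : Prop := out = textFormatter_alt sentance
instance (sentance : String) (out : String) : Decidable (Spec_textFormatter sentance out) := by unfold Spec_textFormatter; infer_instance

-- ===== CLAIM (what is proved, stated in full; the proofs are below) =====
def Claim_equal_textFormatter : Prop := ∀ (sentance : String), Dom_textFormatter sentance → Spec_textFormatter sentance (textFormatter sentance)

-- ===== LEMMAS AND PROOFS =====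

-- simple structural recursion computing splitOn cs [' ']
def mySplit : List Char → List (List Char)
  | [] => [[]]
  | c :: cs =>
    if c = ' ' then [] :: mySplit cs
    else
      match mySplit cs with
      | p :: ps => (c :: p) :: ps
      | [] => [[c]]

theorem mySplit_ne_nil (cs : List Char) : mySplit cs ≠ [] := by
  cases cs with
  | nil => simp [mySplit]
  | cons c cs =>
    simp only [mySplit]
    split
    · simp
    · cases h : mySplit cs <;> simp

-- characterisation of PySem's fuel-based splitOn.go for the single-char ' ' separator
theorem go_spec (fuel : Nat) (l cur : List Char) (acc : List (List Char))
    (h : l.length < fuel) :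
    PySem.Chars.splitOn.go [' '] fuel l cur acc
      = acc.reverse ++ ((cur.reverse ++ (mySplit l).headI) :: (mySplit l).tail) := by
  induction fuel generalizing l cur acc with
  | zero => omega
  | succ fuel ih =>
    cases l with
    | nil => simp [PySem.Chars.splitOn.go, mySplit]
    | cons c rest =>
      by_cases hc : c = ' '
      · subst hc
        have hp : [' '].isPrefixOf (' ' :: rest) = true := by simp [List.isPrefixOf]
        simp only [PySem.Chars.splitOn.go, hp, if_pos, List.length_cons, List.drop_succ_cons,
          List.length_nil, List.drop_zero]
        rw [ih rest [] (cur.reverse :: acc) (by simp at h; omega)]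
        cases hms : mySplit rest with
        | nil => exact absurd hms (mySplit_ne_nil rest)
        | cons p ps => simp [mySplit, hms]
      · have hp : [' '].isPrefixOf (c :: rest) = false := by
          simp only [List.isPrefixOf, Bool.and_eq_false_iff]
          left
          simpa using fun h' => hc h'.symm
        simp only [PySem.Chars.splitOn.go, hp, Bool.false_eq_true, if_false]
        rw [ih rest (c :: cur) acc (by simp at h; omega)]
        cases hms : mySplit rest with
        | nil => exact absurd hms (mySplit_ne_nil rest)
        | cons p ps => simp [mySplit, hc, hms]

theorem splitOn_eq_mySplit (cs : List Char) :
    PySem.Chars.splitOn cs [' '] = mySplit cs := by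
  unfold PySem.Chars.splitOn
  rw [go_spec (cs.length + 1) cs [] [] (by omega)]
  cases hms : mySplit cs with
  | nil => exact absurd hms (mySplit_ne_nil cs)
  | cons p ps => simp

theorem fmod5 (a : Int) : PySem.Int.mod a 5 = a % 5 := by
  show Int.fmod _ _ = _
  rw [Int.fmod_eq_emod, if_pos (Or.inl (by omega))]
  ring

-- the charwise reference function: A's loop with the counter kept in 1..4
def g : List Char → Int → List Char
  | [], _ => []
  | c :: cs, k =>
    if c = ' ' then
      if k = 4 then ' ' :: '\n' :: g cs 1 else ' ' :: g cs (k + 1)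
    else c :: g cs k

theorem afold_eq_g (cs : List Char) (acc : List Char) (k : Int)
    (hk : 1 ≤ k ∧ k ≤ 4) :
    (cs.foldl stepA (acc, k)).1 = acc ++ g cs k := by
  induction cs generalizing acc k with
  | nil => simp [g]
  | cons c cs ih =>
    obtain ⟨h1, h4⟩ := hk
    rw [List.foldl_cons]
    by_cases hc : c = ' '
    · subst hc
      by_cases h4' : k = 4
      · subst h4'
        have hstep : stepA (acc, 4) ' ' = (acc ++ [' ', '\n'], 1) := by
          simp [stepA, PySem.Int.mod]
        rw [hstep, ih _ 1 (by omega)]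
        simp [g]
      · have hstep : stepA (acc, k) ' ' = (acc ++ [' '], k + 1) := by
          simp only [stepA, fmod5, beq_self_eq_true, if_true]
          rw [if_neg (by simp only [beq_iff_eq]; omega)]
        rw [hstep, ih _ (k + 1) (by omega)]
        simp [g, h4']
    · have hstep : stepA (acc, k) c = (acc ++ [c], k) := by
        simp only [stepA, fmod5]
        rw [if_neg (show ¬ (c == ' ') = true by simp [hc]),
            if_neg (by simp only [beq_iff_eq]; omega)]
      rw [hstep, ih _ k (by omega)]
      simp [g, hc]

-- word-level rebuild of A's output tail from gap-counter k ∈ 1..4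
def rtail : List (List Char) → Int → List Char
  | [], _ => []
  | w :: ws, k =>
    (if k = 4 then [' ', '\n'] else [' ']) ++ w ++ rtail ws (if k = 4 then 1 else k + 1)

theorem g_eq_rebuild (cs : List Char) (k : Int) (hk : 1 ≤ k ∧ k ≤ 4) :
    g cs k = (mySplit cs).headI ++ rtail (mySplit cs).tail k := by
  induction cs generalizing k with
  | nil => simp [g, mySplit, rtail]
  | cons c cs ih =>
    obtain ⟨h1, h4⟩ := hk
    by_cases hc : c = ' '
    · subst hc
      cases hms' : mySplit cs with
      | nil => exact absurd hms' (mySplit_ne_nil cs)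
      | cons p ps =>
        by_cases h4' : k = 4
        · subst h4'
          simp only [g]
          rw [ih 1 (by omega)]
          simp [mySplit, hms', rtail]
        · simp only [g, if_neg h4']
          rw [ih (k + 1) (by omega)]
          simp [mySplit, hms', rtail, h4']
    · simp only [g, if_neg hc]
      rw [ih k ⟨h1, h4⟩]
      cases hms' : mySplit cs with
      | nil => exact absurd hms' (mySplit_ne_nil cs)
      | cons p ps =>
        cases ps with
        | nil => simp [mySplit, hc, hms', rtail]
        | cons q qs => simp [mySplit, hc, hms', rtail]

-- B's index fold from gap index j, as a function of the remaining words
def tailConcat : List (List Char) → Nat → List Char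
  | [], _ => []
  | w :: ws, j =>
    (if j % 4 = 0 then [' ', '\n'] else [' ']) ++ w ++ tailConcat ws (j + 1)

-- PySem.Int.mod (Python %) on a Nat-cast index agrees with Nat %
theorem mod4_cast (j : Nat) :
    (PySem.Int.mod (j : Int) 4 == 0) = decide (j % 4 = 0) := by
  have h1 : PySem.Int.mod (j : Int) 4 = ((j % 4 : Nat) : Int) := by
    show Int.fmod _ _ = _
    rw [Int.fmod_eq_emod]
    have : ((0:Int) ≤ 4 ∨ (4:Int) ∣ (j : Int)) := Or.inl (by omega)
    rw [if_pos this]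
    omega
  rw [h1]
  by_cases h : j % 4 = 0 <;> simp [h] <;> omega

theorem bfold_eq_tailConcat (ws pre : List (List Char)) (acc : List Char) :
    ((PySem.List.pyRange (pre.length : Int) ((pre.length : Int) + (ws.length : Int)) 1).foldl
      (stepB (pre ++ ws)) acc) = acc ++ tailConcat ws pre.length := by
  induction ws generalizing pre acc with
  | nil => simp [PySem.List.pyRange, tailConcat]
  | cons w ws ih =>
    rw [PySem.List.pyRange_one_cons (by simp only [List.length_cons]; push_cast; omega)]
    rw [List.foldl_cons]
    have hget : (PySem.List.pyGet? (pre ++ w :: ws) (pre.length : Int)).getD [] = w := by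
      rw [PySem.List.pyGet?_natCast]
      simp
    have hstep : stepB (pre ++ w :: ws) acc (pre.length : Int)
        = acc ++ (if pre.length % 4 = 0 then [' ', '\n'] else [' ']) ++ w := by
      rw [stepB, hget, mod4_cast]
      by_cases h : pre.length % 4 = 0 <;> simp [h]
    rw [hstep]
    have := ih (pre ++ [w]) (acc ++ (if pre.length % 4 = 0 then [' ', '\n'] else [' ']) ++ w)
    have hlen : (pre ++ [w]).length = pre.length + 1 := by simp
    rw [hlen, List.append_assoc] at this
    push_cast at this
    have hcast2 : ((pre.length : Int) + 1 + (ws.length : Int))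
        = (pre.length : Int) + (((w :: ws).length : Nat) : Int) := by
      simp only [List.length_cons]; push_cast; ring
    rw [hcast2] at this
    simp only [List.cons_append, List.nil_append] at this
    rw [this]
    simp only [tailConcat]
    simp [List.append_assoc]

theorem textFormatter_spec : Claim_equal_textFormatter := by
  intro s _
  unfold Spec_textFormatter textFormatter textFormatter_alt
  rw [splitOn_eq_mySplit]
  cases hms : mySplit s.toList with
  | nil => exact absurd hms (mySplit_ne_nil s.toList)
  | cons p ps =>
    have hA := afold_eq_g s.toList [] 1 (by omega)
    have hg := g_eq_rebuild s.toList 1 (by omega)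
    rw [hms] at hg
    have hB := bfold_eq_tailConcat ps [p] p
    have hc1 : (([p] : List (List Char)).length : Int) = 1 := by simp
    rw [hc1] at hB
    have hc2 : ((1 : Int) + (ps.length : Int)) = (((p :: ps).length : Nat) : Int) := by
      simp only [List.length_cons]; push_cast; ring
    rw [hc2] at hB
    simp only [List.cons_append, List.nil_append] at hB
    have hget0 : (PySem.List.pyGet? (p :: ps) (0 : Int)).getD [] = p := by
      have : ((0 : Nat) : Int) = (0 : Int) := rfl
      rw [← this, PySem.List.pyGet?_natCast]
      simp
    have key : ∀ (ws : List (List Char)) (j : Nat) (k : Int), 1 ≤ k → k ≤ 4 →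
        j % 4 = k.toNat % 4 → rtail ws k = tailConcat ws j := by
      intro ws
      induction ws with
      | nil => intro j k _ _ _; simp [rtail, tailConcat]
      | cons w ws ih =>
        intro j k h1 h4 hm
        by_cases hk4 : k = 4
        · subst hk4
          have hj : j % 4 = 0 := by omega
          simp only [rtail, tailConcat, hj, if_true]
          rw [ih (j + 1) 1 (by omega) (by omega) (by omega)]
        · have hj : ¬ j % 4 = 0 := by
            have hkn : k.toNat % 4 = k.toNat := by omega
            omega
          simp only [rtail, tailConcat, if_neg hk4, if_neg hj]
          rw [ih (j + 1) (k + 1) (by omega) (by omega) (by omega)]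
    show String.mk (List.foldl stepA ([], 1) s.toList).1
        = String.mk (List.foldl (stepB (p :: ps)) ((PySem.List.pyGet? (p :: ps) 0).getD [])
            (PySem.List.pyRange 1 ((p :: ps).length : Int)))
    rw [hget0, hB, hA, hg]
    have hl : ([p] : List (List Char)).length = 1 := by simp
    rw [hl]
    simp only [List.nil_append, List.headI, List.tail]
    rw [key ps 1 1 (by omega) (by omega) (by decide)]
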